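-- pv_equiv track=rewrite | github.com/Dullstar/Advent_Of_Code | python/year2021/day17.py | find_valid_x
-- ===== SOURCE A (Python) =====
-- class Probe:
--     def __init__(self, vel_x, vel_y):
--         self.vel_x = vel_x
--         self.vel_y = vel_y
--         self.x = 0
--         self.y = 0
--         self.max_y = 0
--         self.current_step = 0
--
--     def step(self):
--         self.x, self.vel_x = self.move_x(self.x, self.vel_x)
--         self.y, self.vel_y = self.move_y(self.y, self.vel_y)
--         self.current_step += 1
--         if self.y > self.max_y:
--             self.max_y = self.y
--
--     def check(self, target_x_min, target_x_max, target_y_min, target_y_max):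
--         if (self.x >= target_x_min) and (self.x <= target_x_max) \
--                 and (self.y >= target_y_min) and (self.y <= target_y_max):
--             return Status.WORKS
--         if (self.x > target_x_max) or (self.y < target_y_min):
--             return Status.OVERSHOT
--         return Status.KEEP_GOING
--
--     def try_probe(self, target_x_min, target_x_max, target_y_min, target_y_max):
--         while True:
--             self.step()
--             result = self.check(target_x_min, target_x_max, target_y_min, target_y_max)
--             if result == Status.OVERSHOT:
--                 return False,
--             elif result == Status.WORKS:
--                 return True, self.max_y, self.current_step
--
--     @staticmethod
--     def move_x(pos_x: int, vel_x: int):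
--         pos_x += vel_x
--         if vel_x != 0:
--             vel_x += (-1 if vel_x > 0 else 1)
--         return pos_x, vel_x
--
--     @staticmethod
--     def move_y(pos_y: int, vel_y: int):
--         pos_y += vel_y
--         vel_y -= 1
--         return pos_y, vel_y
--
-- def find_valid_x(target_x_min: int, target_x_max: int):
--     valid = set()
--     for vel_x in range(0, target_x_max + 1):
--         init_vel_x = vel_x
--         pos_x = 0
--         step = 0
--         while pos_x < target_x_max:
--             step += 1
--             pos_x, vel_x = Probe.move_x(pos_x, vel_x)
--             if (pos_x >= target_x_min) and (pos_x <= target_x_max):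
--                 valid.add(init_vel_x)
--             if vel_x == 0:
--                 break
--     return list(valid)
-- ===== SOURCE B (Python) =====
-- def _hits_target(tmin, tmax, v):
--     # Probe x-positions after k steps launched at velocity v are the monotone
--     # partial sums p(k) = k*v - k*(k-1)//2 (k = 1 .. max(v, 1), then the probe stalls).
--     steps = max(v, 1)
--     # furthest position is p(steps); the probe never reaches tmin otherwise
--     if 2 * tmin > steps * (2 * v - steps + 1):
--         return False
--     # binary search: least k in [1, steps] with p(k) >= tmin
--     lo, hi = 1, steps
--     while lo < hi:
--         mid = (lo + hi) // 2
--         if 2 * tmin <= mid * (2 * v - mid + 1):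
--             hi = mid
--         else:
--             lo = mid + 1
--     return lo * (2 * v - lo + 1) <= 2 * tmax
--
-- def find_valid_x(target_x_min: int, target_x_max: int):
--     # closed-form + binary-search test per velocity instead of step simulation
--     if target_x_max <= 0:
--         return []
--     return list(set(filter(lambda v: _hits_target(target_x_min, target_x_max, v),
--                            range(0, target_x_max + 1))))
-- ===== Notes on version B (the rewrite author's own statement) =====
-- stated objective: alternative
-- what changed: Per velocity, A simulates the probe step by step until it overshoots or stalls; B instead uses a closed-form reachability guard on the final (triangular-number) position plus a binary search over the monotone step positions for the first step reaching target_x_min, then one interval test; both insert the same valid velocities into a set in the same order, so list(set) output order matches.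
import Mathlib
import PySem

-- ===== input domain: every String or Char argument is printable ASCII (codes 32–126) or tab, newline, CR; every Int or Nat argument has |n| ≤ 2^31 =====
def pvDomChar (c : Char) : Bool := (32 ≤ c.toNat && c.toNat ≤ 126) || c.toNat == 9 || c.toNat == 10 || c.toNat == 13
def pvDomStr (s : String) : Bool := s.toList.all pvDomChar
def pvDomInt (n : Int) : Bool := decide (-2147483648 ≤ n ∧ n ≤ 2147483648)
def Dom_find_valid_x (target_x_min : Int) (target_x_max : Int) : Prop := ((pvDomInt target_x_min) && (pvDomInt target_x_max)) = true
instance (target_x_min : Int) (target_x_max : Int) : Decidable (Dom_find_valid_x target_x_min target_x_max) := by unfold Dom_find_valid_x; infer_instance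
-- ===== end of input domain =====

-- B replaces A's per-velocity step simulation with a closed-form reach guard plus a
-- binary search over the monotone probe positions (alternative algorithm, same values
-- and same list(set) output order).

-- ---- shared helper: exact model of CPython's `set` iteration order ----
-- Both Pythons build `valid` as a set of distinct nonneg ints (hash = value, since all
-- elements are velocities 0 ≤ v ≤ 2^31) added in increasing order, and return
-- list(valid).  The helpers below transcribe CPython's setobject.c: probing checks
-- slots i, i+1 .. i+9 (when i+9 ≤ mask), then perturb >>= 5; i = (i*5+1+perturb)&mask;
-- growth when fill*5 ≥ mask*3 to the smallest power of two > 4*used (2*used above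
-- 50000), re-inserting in table-scan order.  With no deletions a fresh key lands in
-- exactly this first-empty slot (set_add_entry ≡ set_insert_clean), and re-adding a
-- present key is a no-op (modelled in the ports by pvValidAdd).  This model was
-- validated against CPython 3.11 list(set(...)) on thousands of randomized lists.

-- first empty slot among i+1 .. i+n (CPython's LINEAR_PROBES scan), probed in order
def pvLinearScan (table : List (Option Int)) (i : Nat) : Nat → Nat → Option Nat
  | _, 0 => none
  | j, n+1 => if (table.getD (i+j) none).isNone then some (i+j)
              else pvLinearScan table i (j+1) n

-- probe walk of set_insert_clean; fuel only bounds the (always terminating) walk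
def pvFindSlot (table : List (Option Int)) (mask : Nat) : Nat → Nat → Nat → Nat
  | 0, i, _ => i
  | fuel+1, i, perturb =>
    if (table.getD i none).isNone then i
    else
      match pvLinearScan table i 1 (if i + 9 ≤ mask then 9 else 0) with
      | some j => j
      | none =>
        let p' := perturb >>> 5
        pvFindSlot table mask fuel ((i*5 + 1 + p') % (mask+1)) p'

-- insert a fresh element (elements are nonneg, so hash = value = h.toNat)
def pvSetInsert (table : List (Option Int)) (h : Int) : List (Option Int) :=
  let mask := table.length - 1
  table.set (pvFindSlot table mask (table.length + 64) (h.toNat % (mask+1)) h.toNat) (some h)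

-- newsize = 8; while newsize <= minused: newsize <<= 1
def pvNewSize (minused : Nat) : Nat → Nat → Nat
  | 0, cur => cur
  | f+1, cur => if cur ≤ minused then pvNewSize minused f (cur*2) else cur

-- add one fresh element, growing like set_add_entry does
def pvSetAdd (s : List (Option Int) × Nat) (h : Int) : List (Option Int) × Nat :=
  let table := pvSetInsert s.1 h
  let fill := s.2 + 1
  if fill * 5 ≥ (table.length - 1) * 3 then
    let minused := if fill > 50000 then fill * 2 else fill * 4
    let grown := table.foldl
      (fun t e => match e with
        | some x => pvSetInsert t x
        | none => t)
      (List.replicate (pvNewSize minused 64 8) (none : Option Int))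
    (grown, fill)
  else (table, fill)

-- list(s) for a CPython set holding `elems` (distinct, in insertion order)
def pySetList (elems : List Int) : List Int :=
  let s := elems.foldl (fun st x => pvSetAdd st x) (List.replicate 8 (none : Option Int), 0)
  s.1.foldl (fun acc e => match e with | some x => acc ++ [x] | none => acc) []

-- valid.add(x): the set's elements in insertion order; adding a present key is a no-op
def pvValidAdd (valid : List Int) (x : Int) : List Int :=
  if x ∈ valid then valid else valid ++ [x]

-- ===== PORT A =====
-- velocity update of Probe.move_x: vel += (-1 if vel > 0 else 1) unless vel == 0
def pvVelStep (vel : Int) : Int :=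
  if vel ≠ 0 then (if vel > 0 then vel - 1 else vel + 1) else vel

-- inner `while pos_x < target_x_max` loop of A (move_x inlined); fuel = v.toNat + 1
-- bounds the iterations (vel_x reaches 0 after at most v steps and the loop breaks)
def pvALoop (tmin tmax init : Int) : Nat → Int → Int → List Int → List Int
  | 0, _, _, valid => valid
  | fuel+1, pos, vel, valid =>
    if pos < tmax then
      let pos' := pos + vel
      let vel' := pvVelStep vel
      let valid' := if tmin ≤ pos' ∧ pos' ≤ tmax then pvValidAdd valid init else valid
      if vel' = 0 then valid' else pvALoop tmin tmax init fuel pos' vel' valid'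
    else valid

def find_valid_x (target_x_min : Int) (target_x_max : Int) : List Int :=
  let valid := (PySem.List.pyRange 0 (target_x_max + 1) 1).foldl
    (fun valid v => pvALoop target_x_min target_x_max v (v.toNat + 1) 0 v valid) []
  pySetList valid

-- ===== PORT B =====
-- binary search of B: least k in [lo, hi] with 2*tmin ≤ k*(2*v - k + 1)
def pvBSearch (tmin v : Int) : Nat → Int → Int → Int
  | 0, lo, _ => lo
  | fuel+1, lo, hi =>
    if lo < hi then
      let mid := PySem.Int.floordiv (lo + hi) 2
      if 2 * tmin ≤ mid * (2 * v - mid + 1) then pvBSearch tmin v fuel lo mid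
      else pvBSearch tmin v fuel (mid + 1) hi
    else lo

-- closed-form per-velocity test of B (guard + binary search)
def pvHitB (tmin tmax v : Int) : Bool :=
  let steps := max v 1
  if 2 * tmin > steps * (2 * v - steps + 1) then false
  else
    let k := pvBSearch tmin v (steps.toNat + 2) 1 steps
    decide (k * (2 * v - k + 1) ≤ 2 * tmax)

def find_valid_x_alt (target_x_min : Int) (target_x_max : Int) : List Int :=
  if target_x_max ≤ 0 then []
  else
    pySetList ((PySem.List.pyRange 0 (target_x_max + 1) 1).filter
      (fun v => pvHitB target_x_min target_x_max v))

-- ===== PRECONDITION & SPEC =====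
def Spec_find_valid_x (target_x_min : Int) (target_x_max : Int) (out : List Int) : Prop := out = find_valid_x_alt target_x_min target_x_max
instance (target_x_min : Int) (target_x_max : Int) (out : List Int) : Decidable (Spec_find_valid_x target_x_min target_x_max out) := by unfold Spec_find_valid_x; infer_instance

-- ===== CLAIM (what is proved, stated in full; the proofs are below) =====
def Claim_equal_find_valid_x : Prop := ∀ (target_x_min : Int) (target_x_max : Int), Dom_find_valid_x target_x_min target_x_max → Spec_find_valid_x target_x_min target_x_max (find_valid_x target_x_min target_x_max)

-- ===== LEMMAS AND PROOFS =====

theorem pvValidAdd_idem (s : List Int) (x : Int) :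
    pvValidAdd (pvValidAdd s x) x = pvValidAdd s x := by
  unfold pvValidAdd
  by_cases h : x ∈ s <;> simp [h]

-- whether A's inner loop fires valid.add at least once (same control flow as pvALoop)
def pvLoopFires (tmin tmax : Int) : Nat → Int → Int → Bool
  | 0, _, _ => false
  | fuel+1, pos, vel =>
    if pos < tmax then
      let pos' := pos + vel
      let vel' := pvVelStep vel
      (decide (tmin ≤ pos' ∧ pos' ≤ tmax)) ||
        (if vel' = 0 then false else pvLoopFires tmin tmax fuel pos' vel')
    else false

theorem pvALoop_eq_fires (tmin tmax init : Int) :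
    ∀ (fuel : Nat) (pos vel : Int) (valid : List Int),
      pvALoop tmin tmax init fuel pos vel valid =
        (if pvLoopFires tmin tmax fuel pos vel then pvValidAdd valid init else valid) := by
  intro fuel
  induction fuel with
  | zero => intro pos vel valid; simp [pvALoop, pvLoopFires]
  | succ f ih =>
    intro pos vel valid
    simp only [pvALoop, pvLoopFires]
    by_cases hlt : pos < tmax
    · rw [if_pos hlt, if_pos hlt]
      by_cases hv0 : pvVelStep vel = 0
      · rw [if_pos hv0, if_pos hv0]
        by_cases hfire : tmin ≤ pos + vel ∧ pos + vel ≤ tmax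
        · simp [hfire]
        · simp [hfire]
      · rw [if_neg hv0, if_neg hv0, ih]
        by_cases hfire : tmin ≤ pos + vel ∧ pos + vel ≤ tmax
        · by_cases hrec : pvLoopFires tmin tmax f (pos + vel) (pvVelStep vel) = true
          · simp [hfire, hrec, pvValidAdd_idem]
          · simp [hfire, hrec]
        · simp [hfire]
    · rw [if_neg hlt, if_neg hlt]; simp

-- strict growth of the doubled position g k = k*(2v-k+1) for 0 ≤ j < k ≤ v
theorem pvG_lt (v j k : Int) (_h0 : 0 ≤ j) (hjk : j < k) (hkv : k ≤ v) :
    j * (2*v - j + 1) < k * (2*v - k + 1) := by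
  have hfac : k * (2*v - k + 1) - j * (2*v - j + 1) = (k - j) * (2*v - k - j + 1) := by ring
  have hpos : 0 < (k - j) * (2*v - k - j + 1) := by
    apply mul_pos <;> omega
  linarith

theorem pvG_le (v j k : Int) (h0 : 0 < j) (hjk : j ≤ k) (hkv : k ≤ v) :
    j * (2*v - j + 1) ≤ k * (2*v - k + 1) := by
  rcases eq_or_lt_of_le hjk with h | h
  · subst h; exact le_refl _
  · exact le_of_lt (pvG_lt v j k (by omega) h hkv)

-- A's loop from the state after j steps (2*pos = j*(2v-j+1), vel = v-j) fires iff some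
-- later step k ≤ v has doubled position within [2*tmin, 2*tmax]
theorem pvFires_char (tmin tmax v : Int) (_hv : 1 ≤ v) :
    ∀ (fuel : Nat) (j pos : Int), 0 ≤ j → j < v → (v - j).toNat ≤ fuel →
      2 * pos = j * (2*v - j + 1) →
      (pvLoopFires tmin tmax fuel pos (v - j) = true ↔
        ∃ k : Int, j < k ∧ k ≤ v ∧ 2*tmin ≤ k * (2*v - k + 1) ∧ k * (2*v - k + 1) ≤ 2*tmax) := by
  intro fuel
  induction fuel with
  | zero => intro j pos _h0 hjv hfuel _hpos; omega
  | succ f ih =>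
    intro j pos h0 hjv hfuel hpos
    simp only [pvLoopFires]
    by_cases hlt : pos < tmax
    · rw [if_pos hlt]
      have hvel' : pvVelStep (v - j) = v - (j + 1) := by
        unfold pvVelStep; split_ifs <;> omega
      rw [hvel']
      have hpos' : 2 * (pos + (v - j)) = (j+1) * (2*v - (j+1) + 1) := by ring_nf; linarith [hpos]
      have hfire_iff : (decide (tmin ≤ pos + (v - j) ∧ pos + (v - j) ≤ tmax) = true) ↔
          (2*tmin ≤ (j+1) * (2*v - (j+1) + 1) ∧ (j+1) * (2*v - (j+1) + 1) ≤ 2*tmax) := by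
        simp only [decide_eq_true_eq]
        constructor <;> intro h <;> omega
      by_cases hstop : v - (j + 1) = 0
      · -- last step: k can only be j+1 = v
        have hj1 : j + 1 = v := by omega
        rw [if_pos hstop, Bool.or_false, hfire_iff]
        constructor
        · intro h; exact ⟨j+1, by omega, by omega, h.1, h.2⟩
        · rintro ⟨k, hk1, hk2, hk3, hk4⟩
          have : k = j + 1 := by omega
          subst this; exact ⟨hk3, hk4⟩
      · rw [if_neg hstop]
        have hrec := ih (j+1) (pos + (v - j)) (by omega) (by omega) (by omega) hpos'
        rw [Bool.or_eq_true, hrec, hfire_iff]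
        constructor
        · rintro (h | ⟨k, hk1, hk2, hk3, hk4⟩)
          · exact ⟨j+1, by omega, by omega, h.1, h.2⟩
          · exact ⟨k, by omega, hk2, hk3, hk4⟩
        · rintro ⟨k, hk1, hk2, hk3, hk4⟩
          by_cases hkj : k = j + 1
          · subst hkj; exact Or.inl ⟨hk3, hk4⟩
          · exact Or.inr ⟨k, by omega, hk2, hk3, hk4⟩
    · -- loop exits: pos ≥ tmax, and every later position is strictly larger
      rw [if_neg hlt]
      constructor
      · intro h; exact absurd h (by simp)
      · rintro ⟨k, hk1, hk2, hk3, hk4⟩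
        exfalso
        have := pvG_lt v j k h0 hk1 hk2
        omega

-- the binary search returns the least k in [1, steps] satisfying 2*tmin ≤ g k
theorem pvBSearch_least (tmin v steps : Int)
    (hmono : ∀ j k : Int, 0 < j → j ≤ k → k ≤ steps →
      j * (2*v - j + 1) ≤ k * (2*v - k + 1)) :
    ∀ (fuel : Nat) (lo hi : Int), 1 ≤ lo → lo ≤ hi → hi ≤ steps →
      2*tmin ≤ hi * (2*v - hi + 1) →
      (∀ k : Int, 1 ≤ k → k < lo → ¬ 2*tmin ≤ k * (2*v - k + 1)) →
      (hi - lo).toNat ≤ fuel →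
      (1 ≤ pvBSearch tmin v fuel lo hi ∧ pvBSearch tmin v fuel lo hi ≤ steps ∧
        2*tmin ≤ (pvBSearch tmin v fuel lo hi) * (2*v - pvBSearch tmin v fuel lo hi + 1) ∧
        ∀ k : Int, 1 ≤ k → k < pvBSearch tmin v fuel lo hi →
          ¬ 2*tmin ≤ k * (2*v - k + 1)) := by
  intro fuel
  induction fuel with
  | zero =>
    intro lo hi h1 h2 h3 h4 h5 hfuel
    have : lo = hi := by omega
    subst this
    simp only [pvBSearch]
    exact ⟨h1, by omega, h4, h5⟩
  | succ f ih =>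
    intro lo hi h1 h2 h3 h4 h5 hfuel
    simp only [pvBSearch]
    by_cases hlh : lo < hi
    · rw [if_pos hlh]
      rw [PySem.Int.floordiv_eq_ediv_of_pos (by omega : (0:Int) < 2)]
      set mid := (lo + hi) / 2 with hmid
      have hmlo : lo ≤ mid := by omega
      have hmhi : mid < hi := by omega
      by_cases hp : 2 * tmin ≤ mid * (2 * v - mid + 1)
      · rw [if_pos hp]
        exact ih lo mid h1 hmlo (by omega) hp h5 (by omega)
      · rw [if_neg hp]
        refine ih (mid+1) hi (by omega) (by omega) h3 h4 ?_ (by omega)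
        intro k hk1 hk2
        by_cases hklo : k < lo
        · exact h5 k hk1 hklo
        · intro hk
          exact hp (le_trans hk (hmono k mid (by omega) (by omega) (by omega)))
    · rw [if_neg hlh]
      have : lo = hi := by omega
      subst this
      exact ⟨h1, by omega, h4, h5⟩

-- B's closed-form test agrees with A's loop outcome (tmax > 0, 0 ≤ v)
theorem pvHitB_eq_fires (tmin tmax v : Int) (hv : 0 ≤ v) (hmax : 0 < tmax) :
    pvHitB tmin tmax v = pvLoopFires tmin tmax (v.toNat + 1) 0 v := by
  by_cases hv1 : 1 ≤ v
  · -- v ≥ 1: both sides decide ∃ k ∈ [1, v], 2*tmin ≤ g k ∧ g k ≤ 2*tmax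
    have hchar := pvFires_char tmin tmax v hv1 (v.toNat + 1) 0 0 le_rfl (by omega)
      (by omega) (by ring)
    rw [show v - 0 = v from by ring] at hchar
    have hsteps : max v 1 = v := by omega
    rw [Bool.eq_iff_iff, hchar]
    unfold pvHitB
    rw [hsteps]
    by_cases hguard : 2 * tmin > v * (2 * v - v + 1)
    · rw [if_pos hguard]
      simp only [Bool.false_eq_true, false_iff]
      rintro ⟨k, hk1, hk2, hk3, _⟩
      have := pvG_le v k v (by omega) hk2 le_rfl
      omega
    · rw [if_neg hguard]
      have hmono : ∀ j k : Int, 0 < j → j ≤ k → k ≤ v →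
          j * (2*v - j + 1) ≤ k * (2*v - k + 1) := by
        intro j k hj hjk hkv; exact pvG_le v j k hj hjk hkv
      have hks := pvBSearch_least tmin v v hmono (v.toNat + 2) 1 v (le_refl 1) hv1 le_rfl
        (by omega) (by intro k hk1 hk2; omega) (by omega)
      set ks := pvBSearch tmin v (v.toNat + 2) 1 v with hksdef
      obtain ⟨hks1, hks2, hks3, hksleast⟩ := hks
      simp only [decide_eq_true_eq]
      constructor
      · intro h; exact ⟨ks, by omega, hks2, hks3, h⟩
      · rintro ⟨k, hk1, hk2, hk3, hk4⟩
        have hkk : ks ≤ k := by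
          by_contra hlt
          exact hksleast k (by omega) (by omega) hk3
        exact le_trans (pvG_le v ks k (by omega) hkk hk2) hk4
  · -- v = 0: the probe sits at 0 forever; both sides reduce to tmin ≤ 0
    have hv0 : v = 0 := by omega
    subst hv0
    by_cases htm : tmin ≤ 0 <;>
      simp [pvHitB, pvLoopFires, pvBSearch, pvVelStep, hmax, htm]

theorem pySetList_nil : pySetList [] = [] := by decide

-- pyRange with step 1 is strictly increasing
theorem pvPyRange_pairwise (a b : Int) :
    List.Pairwise (· < ·) (PySem.List.pyRange a b 1) := by
  by_cases h : b ≤ a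
  · rw [PySem.List.pyRange_one_eq_nil h]; exact List.Pairwise.nil
  · rw [PySem.List.pyRange_one_cons (by omega)]
    refine List.Pairwise.cons ?_ (pvPyRange_pairwise (a+1) b)
    intro x hx
    have := (PySem.List.mem_pyRange_one).1 hx
    omega
termination_by (b - a).toNat
decreasing_by omega

-- A's set insertions over a strictly increasing candidate list never re-add a
-- present element, so they amount to filtering the candidates
theorem pvFoldl_filter (p : Int → Bool) :
    ∀ (l acc : List Int), (∀ x ∈ acc, ∀ y ∈ l, x < y) → List.Pairwise (· < ·) l →
      l.foldl (fun valid v => if p v then pvValidAdd valid v else valid) acc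
        = acc ++ l.filter p := by
  intro l
  induction l with
  | nil => intro acc _ _; simp
  | cons a t ih =>
    intro acc hlt hpw
    simp only [List.foldl_cons, List.filter_cons]
    cases hp : p a
    · simp only [Bool.false_eq_true, if_false]
      rw [ih acc (fun x hx y hy => hlt x hx y (List.mem_cons_of_mem a hy)) hpw.of_cons]
    · simp only [if_pos]
      have ha : a ∉ acc := fun h => lt_irrefl a (hlt a h a List.mem_cons_self)
      rw [pvValidAdd, if_neg ha,
        ih (acc ++ [a]) ?_ hpw.of_cons, List.append_assoc]
      · simp
      · intro x hx y hy
        rcases List.mem_append.1 hx with h | h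
        · exact hlt x h y (List.mem_cons_of_mem a hy)
        · simp at h; subst h
          exact (List.pairwise_cons.1 hpw).1 y hy

-- ===== VERDICT (by name: the statement is the Claim_ definition above) =====
theorem find_valid_x_spec : Claim_equal_find_valid_x := by
  intro tmin tmax _hdom
  unfold Spec_find_valid_x find_valid_x find_valid_x_alt
  by_cases hmax : tmax ≤ 0
  · simp only [hmax, if_pos]
    rcases lt_or_eq_of_le hmax with h | h
    · rw [PySem.List.pyRange_one_eq_nil (by omega)]
      simpa using pySetList_nil
    · subst h
      rw [show ((0:Int)+1) = 1 by ring, PySem.List.pyRange_one_cons (by omega),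
        PySem.List.pyRange_one_eq_nil (by omega)]
      simp only [List.foldl_cons, List.foldl_nil]
      simpa [pvALoop] using pySetList_nil
  · rw [if_neg hmax]
    have hcongr := PySem.List.foldl_congr_mem
      (l := PySem.List.pyRange 0 (tmax + 1) 1) (init := ([] : List Int))
      (f := fun valid v => pvALoop tmin tmax v (v.toNat + 1) 0 v valid)
      (g := fun valid v => if pvHitB tmin tmax v then pvValidAdd valid v else valid)
      (by
        intro acc x hx
        have hx' := (PySem.List.mem_pyRange_one).1 hx
        simp only []
        rw [pvALoop_eq_fires, pvHitB_eq_fires tmin tmax x hx'.1 (by omega)])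
    rw [hcongr, pvFoldl_filter _ _ [] (by simp) (pvPyRange_pairwise 0 (tmax + 1)),
      List.nil_append]
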